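-- pv_equiv track=rewrite | github.com/altermarkive/training | algorithm-design/python/hackerrank/test_word_order.py | orderly
-- ===== SOURCE A (Python) =====
-- import collections
--
-- def orderly(words):
--     unique = []
--     counted = collections.Counter()
--     for word in words:
--         if word not in counted:
--             unique.append(word)
--         counted[word] += 1
--     return unique, counted
-- ===== SOURCE B (Python) =====
-- import collections
--
-- def orderly(words):
--     unique = list(dict.fromkeys(words))
--     return unique, collections.Counter({w: words.count(w) for w in unique})
-- ===== Notes on version B (the rewrite author's own statement) =====
-- stated objective: alternative
-- what changed: B is two staged passes with no running counter: it first deduplicates the words in first-appearance order via dict.fromkeys, then counts each unique word by scanning the list with words.count (O(n*u) nested scans instead of A's single pass updating a Counter).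
import Mathlib
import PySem

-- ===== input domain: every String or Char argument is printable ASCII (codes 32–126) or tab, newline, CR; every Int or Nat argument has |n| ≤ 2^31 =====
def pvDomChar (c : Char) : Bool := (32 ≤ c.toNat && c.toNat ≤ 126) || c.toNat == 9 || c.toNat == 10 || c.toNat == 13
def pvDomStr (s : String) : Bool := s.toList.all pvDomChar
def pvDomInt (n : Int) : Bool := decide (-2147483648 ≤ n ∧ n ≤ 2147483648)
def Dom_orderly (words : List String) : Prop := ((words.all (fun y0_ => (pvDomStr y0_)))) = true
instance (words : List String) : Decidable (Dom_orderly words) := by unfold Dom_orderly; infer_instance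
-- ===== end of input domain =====

-- B replaces A's single-pass Counter loop by two staged passes (dedup, then count each unique word by scanning); alternative decomposition, not faster.

-- ===== PORT A =====
-- one pass keeping (unique, counted); 'word not in counted' = contains, 'counted[word] += 1' = modify word 0 (+1)
def orderly (words : List String) : List String × (List (String × Int)) :=
  let s := words.foldl
    (fun (s : List String × PySem.Dict String Int) word =>
      ((if s.2.contains word then s.1 else s.1 ++ [word]), s.2.modify word 0 (· + 1)))
    ([], PySem.Dict.empty)
  (s.1, s.2.items)

-- ===== PORT B =====
-- unique = list(dict.fromkeys(words)); then Counter({w: words.count(w) for w in unique}) as its items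
def orderly_alt (words : List String) : List String × (List (String × Int)) :=
  let unique := PySem.List.dedup words
  (unique, unique.map (fun w => (w, (PySem.List.count words w : Int))))

-- ===== PRECONDITION & SPEC =====
def Spec_orderly (words : List String) (out : List String × (List (String × Int))) : Prop := out = orderly_alt words
instance (words : List String) (out : List String × (List (String × Int))) : Decidable (Spec_orderly words out) := by unfold Spec_orderly; infer_instance

-- ===== CLAIM (what is proved, stated in full; the proofs are below) =====
def Claim_equal_orderly : Prop := ∀ (words : List String), Dom_orderly words → Spec_orderly words (orderly words)

-- ===== LEMMAS AND PROOFS =====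

-- A's loop invariant: the running unique list is exactly the keys of the running counter.
theorem orderly_fold_inv (l : List String) (d : PySem.Dict String Int) :
    l.foldl
      (fun (s : List String × PySem.Dict String Int) word =>
        ((if s.2.contains word then s.1 else s.1 ++ [word]), s.2.modify word 0 (· + 1)))
      (d.keys, d)
    = ((l.foldl (fun d x => d.modify x 0 (· + 1)) d).keys,
       l.foldl (fun d x => d.modify x 0 (· + 1)) d) := by
  induction l generalizing d with
  | nil => rfl
  | cons w l ih =>
    simp only [List.foldl_cons]
    have hk : (if d.contains w then d.keys else d.keys ++ [w]) = (d.modify w 0 (· + 1)).keys := by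
      by_cases h : d.contains w = true
      · simp [h, PySem.Dict.modify, PySem.Dict.keys_insert_of_contains d _ h]
      · simp [h, PySem.Dict.modify,
          PySem.Dict.keys_insert_of_not_contains d _ (by simpa using h)]
    rw [hk, ih]

-- ===== VERDICT (by name: the statement is the Claim_ definition above) =====
theorem orderly_spec : Claim_equal_orderly := by
  intro words _
  unfold Spec_orderly orderly orderly_alt
  have h := orderly_fold_inv words PySem.Dict.empty
  simp only [PySem.Dict.keys_empty] at h
  simp only [h]
  rw [show words.foldl (fun d x => d.modify x 0 (· + 1)) PySem.Dict.empty = PySem.Dict.counter words from (PySem.Dict.counter_eq_foldl words).symm]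
  simp [PySem.Dict.items_counter, PySem.Dict.keys_counter, PySem.List.count_eq]
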